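-- pv_equiv track=rewrite | github.com/drdubel/cwiczenia | Python/OIJ/oczko.py | oczko
-- ===== SOURCE A (Python) =====
-- def oczko(karty_graczy, il_graczy):
--     il_wyg = 0
--     wyg = []
--     max_wyn = 0
--     wartosci = {
--         "2": 2,
--         "3": 3,
--         "4": 4,
--         "5": 5,
--         "6": 6,
--         "7": 7,
--         "8": 8,
--         "9": 9,
--         "T": 10,
--         "J": 10,
--         "Q": 10,
--         "K": 10,
--         "A": [1, 11],
--     }
--     for gracz, karty in enumerate(karty_graczy, 1):
--         wynik_1 = 0
--         wynik_2 = 0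
--         for karta in karty:
--             if karta == "A":
--                 wynik_1 += 1
--                 wynik_2 += 11
--             else:
--                 wynik_1 += wartosci[karta]
--                 wynik_2 += wartosci[karta]
--         if wynik_2 > 21 and wynik_1 > 21:
--             wynik = 0
--         elif wynik_2 > 21 and wynik_1 <= 21:
--             wynik = wynik_1
--         elif wynik_1 > 21 and wynik_2 <= 21:
--             wynik = wynik_2
--         else:
--             wynik = max(wynik_1, wynik_2)
--         if wynik > max_wyn:
--             il_wyg = 1
--             wyg = [gracz]
--             max_wyn = wynik
--         elif wynik == max_wyn and wynik != 0:
--             il_wyg += 1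
--             wyg.append(gracz)
--     return il_wyg, wyg
-- ===== SOURCE B (Python) =====
-- def oczko(karty_graczy, il_graczy):
--     wartosci = {
--         "2": 2, "3": 3, "4": 4, "5": 5, "6": 6, "7": 7, "8": 8, "9": 9,
--         "T": 10, "J": 10, "Q": 10, "K": 10,
--     }
--
--     def score(karty):
--         base = sum(1 if k == "A" else wartosci[k] for k in karty)
--         aces = karty.count("A")
--         if base > 21:
--             return 0
--         soft = base + 10 * aces
--         return soft if soft <= 21 else base
--
--     scores = [score(k) for k in karty_graczy]
--     max_wyn = max(scores) if scores else 0
--     wyg = [i for i, s in enumerate(scores, 1) if s == max_wyn and s != 0]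
--     return len(wyg), wyg
-- ===== Notes on version B (the rewrite author's own statement) =====
-- stated objective: simpler
-- what changed: Replaces the incremental max-tracking loop with dual running sums and a 4-way branch by a two-pass compute-all-then-select structure: map each hand to a single score (base with aces as 1, upgraded by +10 per ace when that stays <=21), then take max(scores) and filter the winning indices in one comprehension.
import Mathlib
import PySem

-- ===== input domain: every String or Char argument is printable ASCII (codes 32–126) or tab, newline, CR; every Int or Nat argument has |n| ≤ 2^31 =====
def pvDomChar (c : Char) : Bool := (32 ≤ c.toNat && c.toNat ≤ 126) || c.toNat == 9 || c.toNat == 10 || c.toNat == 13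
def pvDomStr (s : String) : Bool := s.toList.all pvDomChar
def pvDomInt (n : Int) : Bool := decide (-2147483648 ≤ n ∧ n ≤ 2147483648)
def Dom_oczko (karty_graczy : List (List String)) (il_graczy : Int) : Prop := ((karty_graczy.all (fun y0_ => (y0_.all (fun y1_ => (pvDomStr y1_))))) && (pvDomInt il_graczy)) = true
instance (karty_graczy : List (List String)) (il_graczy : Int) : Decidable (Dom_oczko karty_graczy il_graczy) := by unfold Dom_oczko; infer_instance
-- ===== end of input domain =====

-- B replaces A's single incremental max-tracking loop (dual running sums + 4-way branch)
-- by a two-pass structure: score every hand, then select the maximum and its indices (objective: simpler).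

-- ===== PORT A =====
-- A's dict 'wartosci' without its "A" entry: the "A" entry ([1, 11], not an Int) is only ever
-- read through the 'karta == "A"' branch, never via wartosci[karta], so it is dead as a lookup value.
def wartosciA : PySem.Dict String Int :=
  PySem.Dict.ofList [("2",2),("3",3),("4",4),("5",5),("6",6),("7",7),("8",8),("9",9),("T",10),("J",10),("Q",10),("K",10)]

-- wartosci[karta] raises KeyError for a card outside the dict; Pre_oczko excludes exactly those
-- inputs, so the .getD 0 default is never reached on the claimed domain.
def oczko (karty_graczy : List (List String)) (il_graczy : Int) : Int × List Int :=
  let st := (PySem.List.enumerate karty_graczy 1).foldl (fun st p =>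
    let gracz := p.1
    let karty := p.2
    let ws := karty.foldl (fun (w : Int × Int) karta =>
        if karta == "A" then (w.1 + 1, w.2 + 11)
        else (w.1 + (wartosciA.get? karta).getD 0, w.2 + (wartosciA.get? karta).getD 0)) (0, 0)
    let wynik : Int :=
      if ws.2 > 21 ∧ ws.1 > 21 then 0
      else if ws.2 > 21 ∧ ws.1 ≤ 21 then ws.1
      else if ws.1 > 21 ∧ ws.2 ≤ 21 then ws.2
      else max ws.1 ws.2
    if wynik > st.2.2 then ((1 : Int), [gracz], wynik)
    else if wynik = st.2.2 ∧ wynik ≠ 0 then (st.1 + 1, st.2.1 ++ [gracz], st.2.2)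
    else st) ((0 : Int), ([] : List Int), (0 : Int))
  (st.1, st.2.1)

-- ===== PORT B =====
def wartosciB : PySem.Dict String Int :=
  PySem.Dict.ofList [("2",2),("3",3),("4",4),("5",5),("6",6),("7",7),("8",8),("9",9),("T",10),("J",10),("Q",10),("K",10)]

-- wartosci[k] raises KeyError outside the dict (excluded by Pre_oczko); .getD 0 is never reached there.
def scoreB (karty : List String) : Int :=
  let base := (karty.map (fun k => if k == "A" then (1 : Int) else (wartosciB.get? k).getD 0)).sum
  let aces : Int := (PySem.List.count karty "A" : Int)
  if base > 21 then 0
  else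
    let soft := base + 10 * aces
    if soft ≤ 21 then soft else base

def oczko_alt (karty_graczy : List (List String)) (il_graczy : Int) : Int × List Int :=
  let scores := karty_graczy.map scoreB
  let max_wyn : Int := match PySem.List.max? scores (fun x => x) with
    | none => 0
    | some m => m
  let wyg := ((PySem.List.enumerate scores 1).filter (fun p => p.2 == max_wyn && p.2 != 0)).map (·.1)
  ((wyg.length : Int), wyg)

-- ===== PRECONDITION & SPEC =====
-- Pre_oczko excludes exactly the inputs on which Python A raises KeyError: a card that is
-- not one of the 13 card symbols of the dict.
def Pre_oczko (karty_graczy : List (List String)) (il_graczy : Int) : Prop :=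
  ∀ karty ∈ karty_graczy, ∀ k ∈ karty,
    k ∈ (["2","3","4","5","6","7","8","9","T","J","Q","K","A"] : List String)
instance (karty_graczy : List (List String)) (il_graczy : Int) : Decidable (Pre_oczko karty_graczy il_graczy) := by unfold Pre_oczko; infer_instance

def pvWitness_oczko : List (List String) × Int := ([["A","K"],["T","9"]], 2)

def Spec_oczko (karty_graczy : List (List String)) (il_graczy : Int) (out : Int × List Int) : Prop := out = oczko_alt karty_graczy il_graczy
instance (karty_graczy : List (List String)) (il_graczy : Int) (out : Int × List Int) : Decidable (Spec_oczko karty_graczy il_graczy out) := by unfold Spec_oczko; infer_instance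

-- ===== CLAIM (what is proved, stated in full; the proofs are below) =====
def Claim_equal_oczko : Prop := ∀ (karty_graczy : List (List String)) (il_graczy : Int), Dom_oczko karty_graczy il_graczy → Pre_oczko karty_graczy il_graczy → Spec_oczko karty_graczy il_graczy (oczko karty_graczy il_graczy)

-- ===== LEMMAS AND PROOFS =====

-- proof-side abbreviation of A's selection step, as a function of (player index, score)
def selStep (st : Int × List Int × Int) (p : Int × Int) : Int × List Int × Int :=
  if p.2 > st.2.2 then ((1 : Int), [p.1], p.2)
  else if p.2 = st.2.2 ∧ p.2 ≠ 0 then (st.1 + 1, st.2.1 ++ [p.1], st.2.2)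
  else st

theorem wartAB : wartosciA = wartosciB := rfl

-- Inner loop of A: (wynik_1, wynik_2) = (base, base + 10 * aces)
theorem handSums (karty : List String) (a b : Int) :
    karty.foldl (fun (w : Int × Int) karta =>
        if karta == "A" then (w.1 + 1, w.2 + 11)
        else (w.1 + (wartosciA.get? karta).getD 0, w.2 + (wartosciA.get? karta).getD 0)) (a, b)
    = (a + (karty.map (fun k => if k == "A" then (1 : Int) else (wartosciB.get? k).getD 0)).sum,
       b + (karty.map (fun k => if k == "A" then (1 : Int) else (wartosciB.get? k).getD 0)).sum
         + 10 * (karty.count "A" : Int)) := by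
  induction karty generalizing a b with
  | nil => simp
  | cons k t ih =>
    by_cases hk : k = "A"
    · subst hk
      rw [List.foldl_cons]
      simp only [beq_self_eq_true, if_true, List.map_cons, List.sum_cons, List.count_cons_self]
      rw [ih]
      simp only [Prod.mk.injEq]
      push_cast
      constructor <;> ring
    · have hb : (k == "A") = false := beq_eq_false_iff_ne.mpr hk
      have hA : "A" ≠ k := fun h => hk h.symm
      rw [List.foldl_cons]
      simp only [hb, Bool.false_eq_true, if_false, List.map_cons, List.sum_cons]
      rw [ih, wartAB, List.count_cons]
      simp only [hb, Bool.false_eq_true, if_false, add_zero, Prod.mk.injEq]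
      constructor <;> ring

theorem dictVal_nonneg (k : String) : 0 ≤ (wartosciB.get? k).getD 0 := by
  cases h : wartosciB.get? k with
  | none => simp
  | some v =>
    have hm := PySem.Dict.mem_items_of_get?_eq_some _ h
    rw [(by decide : wartosciB.items = [("2",(2:Int)),("3",3),("4",4),("5",5),("6",6),("7",7),("8",8),("9",9),("T",10),("J",10),("Q",10),("K",10)])] at hm
    simp only [List.mem_cons, List.not_mem_nil, or_false, Prod.mk.injEq] at hm
    rcases hm with ⟨-,rfl⟩|⟨-,rfl⟩|⟨-,rfl⟩|⟨-,rfl⟩|⟨-,rfl⟩|⟨-,rfl⟩|⟨-,rfl⟩|⟨-,rfl⟩|⟨-,rfl⟩|⟨-,rfl⟩|⟨-,rfl⟩|⟨-,rfl⟩ <;> norm_num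

theorem base_nonneg (karty : List String) :
    0 ≤ (karty.map (fun k => if k == "A" then (1 : Int) else (wartosciB.get? k).getD 0)).sum := by
  apply List.sum_nonneg
  intro x hx
  simp only [List.mem_map] at hx
  obtain ⟨k, _, rfl⟩ := hx
  by_cases h : k == "A"
  · simp [h]
  · simp only [h, Bool.false_eq_true, if_false]
    exact dictVal_nonneg k

theorem scoreB_eq (karty : List String) :
    scoreB karty =
      (if (karty.map (fun k => if k == "A" then (1 : Int) else (wartosciB.get? k).getD 0)).sum > 21 then 0
       else if (karty.map (fun k => if k == "A" then (1 : Int) else (wartosciB.get? k).getD 0)).sum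
           + 10 * (PySem.List.count karty "A" : Int) ≤ 21 then
         (karty.map (fun k => if k == "A" then (1 : Int) else (wartosciB.get? k).getD 0)).sum
           + 10 * (PySem.List.count karty "A" : Int)
       else (karty.map (fun k => if k == "A" then (1 : Int) else (wartosciB.get? k).getD 0)).sum) := rfl

theorem scoreB_nonneg (karty : List String) : 0 ≤ scoreB karty := by
  rw [scoreB_eq]
  have h1 := base_nonneg karty
  have h2 : (0 : Int) ≤ (PySem.List.count karty "A" : Int) := Int.natCast_nonneg _
  split_ifs <;> omega

-- A's 4-way branch equals B's score
theorem wynik_eq_score (karty : List String) :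
    (let ws := karty.foldl (fun (w : Int × Int) karta =>
        if karta == "A" then (w.1 + 1, w.2 + 11)
        else (w.1 + (wartosciA.get? karta).getD 0, w.2 + (wartosciA.get? karta).getD 0)) (0, 0)
     if ws.2 > 21 ∧ ws.1 > 21 then (0 : Int)
     else if ws.2 > 21 ∧ ws.1 ≤ 21 then ws.1
     else if ws.1 > 21 ∧ ws.2 ≤ 21 then ws.2
     else max ws.1 ws.2) = scoreB karty := by
  rw [handSums]
  rw [scoreB_eq]
  have h2 : (0 : Int) ≤ (PySem.List.count karty "A" : Int) := Int.natCast_nonneg _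
  simp only [PySem.List.count, zero_add]
  split_ifs <;> omega

-- A's fold equals selStep folded over the scores
theorem foldA_eq_selStep (xs : List (List String)) (g : Int) (st : Int × List Int × Int) :
    (PySem.List.enumerate xs g).foldl (fun st p =>
      let gracz := p.1
      let karty := p.2
      let ws := karty.foldl (fun (w : Int × Int) karta =>
          if karta == "A" then (w.1 + 1, w.2 + 11)
          else (w.1 + (wartosciA.get? karta).getD 0, w.2 + (wartosciA.get? karta).getD 0)) (0, 0)
      let wynik : Int :=
        if ws.2 > 21 ∧ ws.1 > 21 then 0
        else if ws.2 > 21 ∧ ws.1 ≤ 21 then ws.1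
        else if ws.1 > 21 ∧ ws.2 ≤ 21 then ws.2
        else max ws.1 ws.2
      if wynik > st.2.2 then ((1 : Int), [gracz], wynik)
      else if wynik = st.2.2 ∧ wynik ≠ 0 then (st.1 + 1, st.2.1 ++ [gracz], st.2.2)
      else st) st
    = (PySem.List.enumerate (xs.map scoreB) g).foldl selStep st := by
  induction xs generalizing g st with
  | nil => simp [PySem.List.enumerate_nil]
  | cons k t ih =>
    rw [List.map_cons, PySem.List.enumerate_cons, PySem.List.enumerate_cons,
      List.foldl_cons, List.foldl_cons]
    rw [← ih]
    congr 1
    have := wynik_eq_score k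
    simp only at this
    simp only [selStep, this]

theorem le_foldl_max' (l : List Int) (a : Int) : a ≤ l.foldl max a := by
  induction l generalizing a with
  | nil => simp
  | cons x t ih => exact le_trans (le_max_left a x) (ih (max a x))

-- The selection loop characterized: final max and all indices achieving it
theorem selLoop (scores : List Int) (g : Int) (wyg0 : List Int) (mx0 : Int) (h0 : 0 ≤ mx0) :
    (PySem.List.enumerate scores g).foldl selStep ((wyg0.length : Int), wyg0, mx0)
    = (let M := scores.foldl max mx0
       let W := (if M = mx0 then wyg0 else [])
         ++ ((PySem.List.enumerate scores g).filter (fun p => p.2 == M && p.2 != 0)).map (·.1)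
       ((W.length : Int), W, M)) := by
  induction scores generalizing g wyg0 mx0 with
  | nil => simp [PySem.List.enumerate_nil]
  | cons s rest ih =>
    rw [PySem.List.enumerate_cons, List.foldl_cons, List.foldl_cons]
    simp only [selStep]
    by_cases hgt : s > mx0
    · rw [if_pos hgt]
      have hs : (0 : Int) ≤ s := le_of_lt (lt_of_le_of_lt h0 hgt)
      have : ((1 : Int), ([g] : List Int), s) = ((([g] : List Int).length : Int), ([g] : List Int), s) := by simp
      rw [this, ih (g + 1) [g] s hs]
      have hmax : max mx0 s = s := max_eq_right (le_of_lt hgt)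
      have hM : rest.foldl max s = rest.foldl max (max mx0 s) := by rw [hmax]
      have hle : s ≤ rest.foldl max s := le_foldl_max' rest s
      have hMne : rest.foldl max s ≠ mx0 := by omega
      have hMne0 : rest.foldl max s ≠ 0 := by omega
      simp only [← hM, if_neg hMne, List.nil_append, List.filter_cons]
      by_cases hsM : s = rest.foldl max s
      · have hs0 : ¬ s = 0 := by omega
        simp [← hsM, hs0]
      · have hMs : ¬ rest.foldl max s = s := fun h => hsM h.symm
        have hcond : ¬ ((s == rest.foldl max s && s != 0) = true) := by
          simp only [Bool.and_eq_true, beq_iff_eq, bne_iff_ne, ne_eq]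
          rintro ⟨h1, -⟩; exact hsM h1
        simp [hcond, hMs]
    · rw [if_neg hgt]
      by_cases heq : s = mx0 ∧ s ≠ 0
      · rw [if_pos heq]
        have hlen : ((wyg0.length : Int) + 1, wyg0 ++ [g], mx0)
            = (((wyg0 ++ [g]).length : Int), wyg0 ++ [g], mx0) := by
          simp [List.length_append]
        rw [hlen, ih (g + 1) (wyg0 ++ [g]) mx0 h0]
        have hmax : max mx0 s = mx0 := max_eq_left (le_of_not_gt hgt)
        have hM : rest.foldl max (max mx0 s) = rest.foldl max mx0 := by rw [hmax]
        have hle : mx0 ≤ rest.foldl max mx0 := le_foldl_max' rest mx0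
        simp only [hM, List.filter_cons]
        by_cases hMeq : rest.foldl max mx0 = mx0
        · have hm0 : ¬ mx0 = 0 := fun h => heq.2 (by rw [heq.1, h])
          simp [hMeq, heq.1, hm0, List.append_assoc, List.length_append]
        · have hdrop : ¬ ((s == rest.foldl max mx0 && s != 0) = true) := by
            simp only [Bool.and_eq_true, beq_iff_eq, bne_iff_ne, ne_eq]
            rintro ⟨h1, -⟩
            exact hMeq (by rw [← h1, heq.1])
          simp [hMeq, hdrop]
      · rw [if_neg heq]
        have hle : s ≤ mx0 := le_of_not_gt hgt
        have hmax : max mx0 s = mx0 := max_eq_left hle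
        have hM : rest.foldl max (max mx0 s) = rest.foldl max mx0 := by rw [hmax]
        rw [ih (g + 1) wyg0 mx0 h0]
        have hleM : mx0 ≤ rest.foldl max mx0 := le_foldl_max' rest mx0
        have hdrop : ¬ (s == rest.foldl max mx0 && s != 0) = true := by
          simp only [Bool.and_eq_true, beq_iff_eq, bne_iff_ne, ne_eq]
          rintro ⟨h1, h2⟩
          rcases not_and_or.mp heq with h | h
          · omega
          · exact h2 (not_not.mp h)
        simp only [hM, List.filter_cons, hdrop]
        simp

-- ===== VERDICT (by name: the statement is the Claim_ definition above) =====
theorem oczko_spec : Claim_equal_oczko := by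
  intro xs il _ _
  unfold Spec_oczko oczko oczko_alt
  rw [foldA_eq_selStep]
  have h0 : ((0 : Int), ([] : List Int), (0 : Int))
      = ((([] : List Int).length : Int), ([] : List Int), (0 : Int)) := by simp
  rw [h0, selLoop (xs.map scoreB) 1 [] 0 le_rfl]
  simp only [ite_self, List.nil_append]
  cases hxs : xs with
  | nil => simp [PySem.List.enumerate_nil, PySem.List.max?]
  | cons k t =>
    simp only [List.map_cons]
    rw [PySem.List.max?_id_cons]
    have hk : (0 : Int) ≤ scoreB k := scoreB_nonneg k
    have : List.foldl max 0 (scoreB k :: t.map scoreB)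
        = List.foldl max (scoreB k) (t.map scoreB) := by
      rw [List.foldl_cons, max_eq_right hk]
    rw [this]
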